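-- pv_equiv track=rewrite | github.com/Frankyoel/Ahorcado-con-Python | main.py | obtener_letra_clic
-- ===== SOURCE A (Python) =====
-- def obtener_letra_clic(raton_x, raton_y):
--     # Obtiene la letra
--     letras = "ABCDEFGHIJKLMNOPQRSTUVWXYZ"
--     x_inicio = 100
--     y_inicio = 120
--     ancho_btn = 40
--     alto_btn = 40
--     espaciado = 5
--     por_fila = 13
--
--     for i, letra in enumerate(letras):
--         fila = i // por_fila
--         columna = i % por_fila
--
--         x = x_inicio + columna * (ancho_btn + espaciado)
--         y = y_inicio - fila * (alto_btn + espaciado)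
--
--         if (x <= raton_x <= x + ancho_btn and
--             y - alto_btn <= raton_y <= y):
--             return letra
--     return None
-- ===== SOURCE B (Python) =====
-- def obtener_letra_clic(raton_x, raton_y):
--     # Direct grid arithmetic: compute the only candidate cell, then re-check its bounds.
--     letras = "ABCDEFGHIJKLMNOPQRSTUVWXYZ"
--     x_inicio = 100
--     y_inicio = 120
--     ancho_btn = 40
--     alto_btn = 40
--     espaciado = 5
--     por_fila = 13
--
--     paso = ancho_btn + espaciado  # 45 (same vertically)
--     cx = raton_x - x_inicio
--     cy = y_inicio - raton_y
--     if cx < 0 or cy < 0: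
--         return None
--     columna = cx // paso
--     fila = cy // paso
--     i = fila * por_fila + columna
--     if columna >= por_fila or i >= len(letras):
--         return None
--     x = x_inicio + columna * paso
--     y = y_inicio - fila * paso
--     if x <= raton_x <= x + ancho_btn and y - alto_btn <= raton_y <= y:
--         return letras[i]
--     return None
-- ===== Notes on version B (the rewrite author's own statement) =====
-- stated objective: alternative
-- what changed: Replaces A's linear scan over all 26 buttons with direct arithmetic: floor-divide the mouse offsets by the cell pitch to compute the unique candidate row/column, then re-check that one button's bounds.
import Mathlib
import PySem

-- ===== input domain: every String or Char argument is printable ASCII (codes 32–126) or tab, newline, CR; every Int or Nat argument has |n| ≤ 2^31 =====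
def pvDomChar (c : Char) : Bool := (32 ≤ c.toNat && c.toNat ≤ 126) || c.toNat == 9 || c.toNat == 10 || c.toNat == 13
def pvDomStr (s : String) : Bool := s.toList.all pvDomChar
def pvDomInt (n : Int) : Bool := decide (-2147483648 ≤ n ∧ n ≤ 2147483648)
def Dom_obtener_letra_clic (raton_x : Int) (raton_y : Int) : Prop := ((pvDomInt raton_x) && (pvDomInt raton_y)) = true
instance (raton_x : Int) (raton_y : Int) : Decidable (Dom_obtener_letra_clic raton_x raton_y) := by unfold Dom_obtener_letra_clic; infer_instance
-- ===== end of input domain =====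

-- B replaces A's scan over all 26 buttons by direct grid arithmetic: floor-divide the mouse offsets
-- to find the single candidate cell, then re-check that cell's bounds (objective: alternative — one
-- cell test instead of a scan; not measurably faster at these call costs).

-- ===== PORT A =====
-- the button test of A's loop body, named so the lemmas can speak about it
def pvHit (raton_x raton_y i : Int) : Bool :=
  decide (100 + PySem.Int.mod i 13 * (40 + 5) ≤ raton_x ∧ raton_x ≤ 100 + PySem.Int.mod i 13 * (40 + 5) + 40 ∧
    (120 - PySem.Int.floordiv i 13 * (40 + 5) - 40 ≤ raton_y ∧ raton_y ≤ 120 - PySem.Int.floordiv i 13 * (40 + 5)))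

-- for i, letra in enumerate(letras): fila = i//13; columna = i%13; x = 100+columna*45; y = 120-fila*45;
-- return letra on the first hit; None after the loop
def pvLoopA (raton_x raton_y : Int) : List (Int × Char) → Option String
  | [] => none
  | (i, letra) :: rest =>
    if pvHit raton_x raton_y i then some (String.ofList [letra])
    else pvLoopA raton_x raton_y rest

def obtener_letra_clic (raton_x : Int) (raton_y : Int) : Option String :=
  pvLoopA raton_x raton_y (PySem.List.enumerate "ABCDEFGHIJKLMNOPQRSTUVWXYZ".toList)

-- ===== PORT B =====
def obtener_letra_clic_alt (raton_x : Int) (raton_y : Int) : Option String :=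
  let letras := "ABCDEFGHIJKLMNOPQRSTUVWXYZ"
  let paso : Int := 40 + 5
  let cx := raton_x - 100
  let cy := 120 - raton_y
  if cx < 0 ∨ cy < 0 then none
  else
    let columna := PySem.Int.floordiv cx paso
    let fila := PySem.Int.floordiv cy paso
    let i := fila * 13 + columna
    if columna ≥ 13 ∨ i ≥ 26 then none
    else
      let x := 100 + columna * paso
      let y := 120 - fila * paso
      if x ≤ raton_x ∧ raton_x ≤ x + 40 ∧ (y - 40 ≤ raton_y ∧ raton_y ≤ y) then
        (PySem.Str.pyGet? letras i).map (fun ch => String.ofList [ch])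
      else none

-- ===== PRECONDITION & SPEC =====
def Spec_obtener_letra_clic (raton_x : Int) (raton_y : Int) (out : Option String) : Prop := out = obtener_letra_clic_alt raton_x raton_y
instance (raton_x : Int) (raton_y : Int) (out : Option String) : Decidable (Spec_obtener_letra_clic raton_x raton_y out) := by unfold Spec_obtener_letra_clic; infer_instance

-- ===== CLAIM (what is proved, stated in full; the proofs are below) =====
def Claim_equal_obtener_letra_clic : Prop := ∀ (raton_x : Int) (raton_y : Int), Dom_obtener_letra_clic raton_x raton_y → Spec_obtener_letra_clic raton_x raton_y (obtener_letra_clic raton_x raton_y)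

-- ===== LEMMAS AND PROOFS =====

theorem pvLoopA_none (rx ry : Int) (l : List (Int × Char))
    (h : ∀ p ∈ l, ¬ pvHit rx ry p.1 = true) : pvLoopA rx ry l = none := by
  induction l with
  | nil => rfl
  | cons p rest ih =>
    obtain ⟨i, letra⟩ := p
    rw [pvLoopA, if_neg (h (i, letra) (List.mem_cons_self))]
    exact ih fun q hq => h q (List.mem_cons_of_mem _ hq)

theorem pvLoopA_some (rx ry : Int) (l : List (Int × Char)) (i : Int) (ch : Char)
    (hmem : (i, ch) ∈ l) (hhit : pvHit rx ry i = true)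
    (huniq : ∀ p ∈ l, pvHit rx ry p.1 = true → p = (i, ch)) :
    pvLoopA rx ry l = some (String.ofList [ch]) := by
  induction l with
  | nil => cases hmem
  | cons p rest ih =>
    obtain ⟨j, d⟩ := p
    by_cases hj : pvHit rx ry j = true
    · rw [pvLoopA, if_pos hj]
      have := huniq (j, d) List.mem_cons_self hj
      rw [Prod.mk.injEq] at this
      rw [this.2]
    · rw [pvLoopA, if_neg hj]
      have hmem' : (i, ch) ∈ rest := by
        rcases List.mem_cons.mp hmem with h | h
        · exact absurd (by rw [Prod.mk.injEq] at h; rw [h.1] at hhit; exact hhit) hj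
        · exact h
      exact ih hmem' fun q hq => huniq q (List.mem_cons_of_mem _ hq)

theorem pvLen26 : "ABCDEFGHIJKLMNOPQRSTUVWXYZ".toList.length = 26 := by decide

-- membership of an index–letter pair in the enumerated alphabet
theorem pvMemEnum (p : Int × Char)
    (hp : p ∈ PySem.List.enumerate "ABCDEFGHIJKLMNOPQRSTUVWXYZ".toList) :
    ∃ (k : Nat) (hk : k < 26), p = ((k : Int), "ABCDEFGHIJKLMNOPQRSTUVWXYZ".toList[k]'(by rw [pvLen26]; exact hk)) := by
  obtain ⟨k, hk, hpk⟩ := (PySem.List.mem_enumerate_iff _ _ _).mp hp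
  rw [pvLen26] at hk
  exact ⟨k, hk, by simpa using hpk⟩

-- pvHit in pure ediv/emod form, ready for omega
theorem pvHit_iff (rx ry i : Int) :
    pvHit rx ry i = true ↔
      (100 + i % 13 * 45 ≤ rx ∧ rx ≤ 100 + i % 13 * 45 + 40 ∧
        (120 - i / 13 * 45 - 40 ≤ ry ∧ ry ≤ 120 - i / 13 * 45)) := by
  simp only [pvHit, decide_eq_true_eq]
  rw [ PySem.Int.mod_eq_emod_of_pos (by norm_num), PySem.Int.floordiv_eq_ediv_of_pos (by norm_num)]
  norm_num

set_option maxHeartbeats 1000000 in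
theorem pvKey (rx ry : Int) : obtener_letra_clic rx ry = obtener_letra_clic_alt rx ry := by
  rw [obtener_letra_clic]
  simp only [obtener_letra_clic_alt,
    PySem.Int.floordiv_eq_ediv_of_pos (show (0 : Int) < 40 + 5 by norm_num)]
  by_cases hneg : rx - 100 < 0 ∨ 120 - ry < 0
  · rw [if_pos hneg]
    refine pvLoopA_none rx ry _ fun p hp hhit => ?_
    obtain ⟨k, hk, rfl⟩ := pvMemEnum p hp
    rw [pvHit_iff] at hhit
    rcases hneg with h | h <;> omega
  · rw [if_neg hneg]
    rw [not_or, not_lt, not_lt] at hneg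
    obtain ⟨h1, h2⟩ := hneg
    by_cases hout : (rx - 100) / (40 + 5) ≥ 13 ∨ (120 - ry) / (40 + 5) * 13 + (rx - 100) / (40 + 5) ≥ 26
    · rw [if_pos hout]
      refine pvLoopA_none rx ry _ fun p hp hhit => ?_
      obtain ⟨k, hk, rfl⟩ := pvMemEnum p hp
      rw [pvHit_iff] at hhit
      rcases hout with h | h <;> omega
    · rw [if_neg hout]
      rw [not_or, not_le, not_le] at hout
      obtain ⟨h3, h4⟩ := hout
      by_cases hin : 100 + (rx - 100) / (40 + 5) * (40 + 5) ≤ rx ∧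
          rx ≤ 100 + (rx - 100) / (40 + 5) * (40 + 5) + 40 ∧
          (120 - (120 - ry) / (40 + 5) * (40 + 5) - 40 ≤ ry ∧ ry ≤ 120 - (120 - ry) / (40 + 5) * (40 + 5))
      · rw [if_pos hin]
        -- the single candidate index
        have hi0 : 0 ≤ (120 - ry) / (40 + 5) * 13 + (rx - 100) / (40 + 5) := by omega
        set i : Int := (120 - ry) / (40 + 5) * 13 + (rx - 100) / (40 + 5) with hidef
        have hi26 : i < 26 := by omega
        have hkn : i.toNat < "ABCDEFGHIJKLMNOPQRSTUVWXYZ".toList.length := by rw [pvLen26]; omega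
        have hget : PySem.Str.pyGet? "ABCDEFGHIJKLMNOPQRSTUVWXYZ" i =
            some ("ABCDEFGHIJKLMNOPQRSTUVWXYZ".toList[i.toNat]'hkn) := by
          rw [PySem.Str.pyGet?_eq, PySem.Chars.pyGet?_eq_listPyGet?,
            PySem.List.pyGet?_of_nonneg _ hi0, List.getElem?_eq_getElem hkn]
        rw [hget]
        have hcast : ((i.toNat : Int)) = i := Int.toNat_of_nonneg hi0
        refine pvLoopA_some rx ry _ (i.toNat : Int) _ ?_ ?_ ?_
        · refine (PySem.List.mem_enumerate_iff _ _ _).mpr ⟨i.toNat, hkn, ?_⟩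
          norm_num
        · rw [pvHit_iff, hcast]; omega
        · intro p hp hhit
          obtain ⟨k, hk, rfl⟩ := pvMemEnum p hp
          rw [pvHit_iff] at hhit
          have : (k : Int) = (i.toNat : Int) := by rw [hcast]; omega
          rw [Prod.mk.injEq]
          refine ⟨this, ?_⟩
          have hkk : k = i.toNat := by exact_mod_cast this
          subst hkk
          rfl
      · rw [if_neg hin]
        refine pvLoopA_none rx ry _ fun p hp hhit => ?_
        obtain ⟨k, hk, rfl⟩ := pvMemEnum p hp
        rw [pvHit_iff] at hhit
        exact hin (by constructor <;> [omega; (constructor <;> [omega; (constructor <;> omega)])])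

-- ===== VERDICT (by name: the statement is the Claim_ definition above) =====
theorem obtener_letra_clic_spec : Claim_equal_obtener_letra_clic := by
  intro rx ry _
  unfold Spec_obtener_letra_clic
  exact pvKey rx ry
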